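-- pv_equiv track=rewrite | github.com/demisto/content | Packs/Base/Scripts/DBotMLFetchData/DBotMLFetchData.py | get_characters_features
-- ===== SOURCE A (Python) =====
-- import string
--
-- def get_characters_features(text):
--     characters_count = {}
--     for c in string.printable:
--         if c in ['[', ']', '<']:
--             continue
--         count = text.count(c)
--         if count > 0:
--             characters_count[c] = count
--     return characters_count
-- ===== SOURCE B (Python) =====
-- import string
-- from collections import Counter
--
-- # printable-order rank of every allowed character
-- _ORDER = {c: i for i, c in enumerate(string.printable) if c not in '[]<'}
--
--
-- def get_characters_features(text):
--     # One pass builds a Counter; then we walk the DISTINCT characters present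
--     # in the text, keep the allowed ones, and sort them into printable order.
--     counts = Counter(text)
--     present = [(c, n) for c, n in counts.items() if c in _ORDER]
--     present.sort(key=lambda kv: _ORDER[kv[0]])
--     return dict(present)
-- ===== Notes on version B (the rewrite author's own statement) =====
-- stated objective: alternative
-- what changed: B inverts the traversal: instead of A's loop over the fixed printable alphabet scanning the whole text per character (text.count), B counts the text once, iterates over the distinct characters actually present, filters them by a precomputed allowed-rank table, and sorts the survivors into printable order.
import Mathlib
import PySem

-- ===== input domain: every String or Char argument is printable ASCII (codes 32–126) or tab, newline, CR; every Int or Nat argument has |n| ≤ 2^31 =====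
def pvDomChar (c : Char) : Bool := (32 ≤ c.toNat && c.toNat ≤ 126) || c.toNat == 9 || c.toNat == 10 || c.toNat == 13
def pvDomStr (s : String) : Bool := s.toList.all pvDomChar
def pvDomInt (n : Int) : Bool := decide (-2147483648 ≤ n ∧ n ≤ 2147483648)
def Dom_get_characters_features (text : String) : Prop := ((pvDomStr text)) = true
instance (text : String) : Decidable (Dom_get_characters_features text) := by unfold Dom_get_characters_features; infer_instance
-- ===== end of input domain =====

-- B walks the DISTINCT characters present in the text (a Counter built in one pass), filters them by an
-- allowed-rank table and sorts into printable order, instead of A's loop over the printable alphabet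
-- re-scanning the text per character (alternative traversal; similar measured cost).


-- string.printable (digits, lowercase, uppercase, punctuation, whitespace — exactly CPython's order)
def pyPrintable : List Char :=
  "0123456789abcdefghijklmnopqrstuvwxyzABCDEFGHIJKLMNOPQRSTUVWXYZ!\"#$%&'()*+,-./:;<=>?@[\\]^_`{|}~ \t\n\r\x0b\x0c".toList

-- ===== PORT A =====
def get_characters_features (text : String) : List (String × Int) :=
  (pyPrintable.foldl
    (fun (d : PySem.Dict String Int) c =>
      if c ∈ (['[', ']', '<'] : List Char) then d
      else
        let count : Int := (PySem.Str.count text (String.ofList [c]) : Int)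
        if count > 0 then d.insert (String.ofList [c]) count else d)
    PySem.Dict.empty).items

-- ===== PORT B =====
-- the characters B drops: '[]<'
def pyExcluded : List Char := "[]<".toList

-- _ORDER = {c: i for i, c in enumerate(string.printable) if c not in '[]<'}
def pyOrder : PySem.Dict Char Int :=
  (PySem.List.enumerate pyPrintable 0).foldl
    (fun (d : PySem.Dict Char Int) p => if p.2 ∈ pyExcluded then d else d.insert p.2 p.1)
    PySem.Dict.empty

def get_characters_features_alt (text : String) : List (String × Int) :=
  let counts : PySem.Dict Char Int := PySem.Dict.counter text.toList
  let present := counts.items.filter (fun kv => pyOrder.contains kv.1)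
  let sortedPresent := PySem.List.sorted present (fun kv => pyOrder.getD kv.1 0) false
  (sortedPresent.foldl
    (fun (d : PySem.Dict String Int) kv => d.insert (String.ofList [kv.1]) kv.2)
    PySem.Dict.empty).items

-- ===== PRECONDITION & SPEC =====
def Spec_get_characters_features (text : String) (out : List (String × Int)) : Prop := out = get_characters_features_alt text
instance (text : String) (out : List (String × Int)) : Decidable (Spec_get_characters_features text out) := by unfold Spec_get_characters_features; infer_instance

-- ===== CLAIM (what is proved, stated in full; the proofs are below) =====
def Claim_equal_get_characters_features : Prop := ∀ (text : String), Dom_get_characters_features text → Spec_get_characters_features text (get_characters_features text)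

-- ===== LEMMAS AND PROOFS =====

-- str.count with a single-character needle is the plain character count
lemma count_go_single (c : Char) (l : List Char) (fuel acc : Nat) (h : l.length ≤ fuel) :
    PySem.Chars.count.go [c] fuel l acc = acc + l.count c := by
  induction l generalizing fuel acc with
  | nil => cases fuel <;> simp [PySem.Chars.count.go]
  | cons x t ih =>
    cases fuel with
    | zero => simp at h
    | succ f =>
      simp only [List.length_cons, Nat.succ_le_succ_iff] at h
      by_cases hx : c = x
      · subst hx
        simp [PySem.Chars.count.go, List.isPrefixOf, ih _ _ h]
        omega
      · have hpre : [c].isPrefixOf (x :: t) = false := by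
          simp [List.isPrefixOf]; exact hx
        have hne : ¬ x = c := fun hxc => hx hxc.symm
        simp [PySem.Chars.count.go, hpre, ih _ _ h, hne]

lemma chars_count_single (cs : List Char) (c : Char) :
    PySem.Chars.count cs [c] = cs.count c := by
  simp [PySem.Chars.count, count_go_single c cs cs.length 0 le_rfl]

set_option maxRecDepth 40000 in
lemma pyPrintable_nodup : pyPrintable.Nodup := by decide

set_option maxRecDepth 40000 in
lemma pyOrder_keys : pyOrder.keys = pyPrintable.filter (fun c => !decide (c ∈ pyExcluded)) := by decide

lemma pyOrder_contains (c : Char) :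
    pyOrder.contains c = true ↔ (c ∈ pyPrintable ∧ c ∉ pyExcluded) := by
  rw [PySem.Dict.contains_iff_mem_keys, pyOrder_keys, List.mem_filter]
  simp

-- the rank table is strictly increasing along the allowed part of string.printable
set_option maxRecDepth 40000 in
lemma pyOrder_rank_pairwise :
    ((pyPrintable.filter (fun c => !decide (c ∈ pyExcluded))).map
      (fun c => pyOrder.getD c 0)).Pairwise (· < ·) := by decide

lemma ofList_single_injective : Function.Injective (fun c => String.ofList [c]) := by
  intro a b h
  have := congrArg String.toList h
  simpa using this

-- ===== VERDICT (by name: the statement is the Claim_ definition above) =====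
set_option maxHeartbeats 1000000 in
theorem get_characters_features_spec : Claim_equal_get_characters_features := by
  intro text _
  unfold Spec_get_characters_features get_characters_features get_characters_features_alt
  simp only []
  have hexcl : (['[', ']', '<'] : List Char) = pyExcluded := rfl
  set cs := text.toList with hcs
  set cnt : Char → Int := fun c => (cs.count c : Int) with hcnt
  set pA : Char → Bool := fun c => !decide (c ∈ pyExcluded) && decide (0 < cs.count c) with hpA
  set good := pyPrintable.filter pA with hgood
  have hgoodnodup : good.Nodup := pyPrintable_nodup.filter pA
  have hmapnodup : (good.map (fun c => String.ofList [c])).Nodup :=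
    hgoodnodup.map ofList_single_injective
  have hempty : (PySem.Dict.empty : PySem.Dict String Int).items = [] := rfl
  -- ---- A side: the loop over printable is a loop over the good characters, inserting fresh keys
  have hAbody : (fun (d : PySem.Dict String Int) c =>
      if c ∈ (['[', ']', '<'] : List Char) then d
      else
        let count : Int := (PySem.Str.count text (String.ofList [c]) : Int)
        if count > 0 then d.insert (String.ofList [c]) count else d)
      = (fun (d : PySem.Dict String Int) c => if pA c then d.insert (String.ofList [c]) (cnt c) else d) := by
    funext d c
    simp only [PySem.Str.count_eq]
    have hl : (String.ofList [c]).toList = [c] := by simp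
    rw [hl, chars_count_single]
    by_cases hm : c ∈ pyExcluded
    · simp [hexcl, hm, hpA]
    · by_cases hc : 0 < cs.count c
      · simp only [hexcl]
        simp [hm, hpA, hc, hcnt, List.count_pos_iff, ← hcs]
        exact fun h => absurd (List.count_pos_iff.mp hc) h
      · simp only [hexcl]
        simp [hm, hpA, hc, hcnt, List.count_pos_iff, ← hcs]
        exact fun h => absurd (List.count_pos_iff.mpr h) hc
  have hAitems : (pyPrintable.foldl
      (fun (d : PySem.Dict String Int) c =>
        if c ∈ (['[', ']', '<'] : List Char) then d
        else
          let count : Int := (PySem.Str.count text (String.ofList [c]) : Int)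
          if count > 0 then d.insert (String.ofList [c]) count else d)
      PySem.Dict.empty).items
      = good.map (fun c => (String.ofList [c], cnt c)) := by
    rw [hAbody]
    have hff := List.foldl_filter (p := pA)
      (f := fun (d : PySem.Dict String Int) c => d.insert (String.ofList [c]) (cnt c))
      (l := pyPrintable) (init := PySem.Dict.empty)
    rw [← hgood] at hff
    rw [← hff]
    rw [PySem.Dict.items_foldl_insert_fresh good (fun c => String.ofList [c]) cnt PySem.Dict.empty
      (fun a _ => by simp [pysem]) hmapnodup]
    rw [hempty, List.nil_append]
  -- ---- B side
  have hpresent : (PySem.Dict.counter cs).items.filter (fun kv => pyOrder.contains kv.1)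
      = ((PySem.Set.ofList cs).filter (fun c => pyOrder.contains c)).map (fun c => (c, cnt c)) := by
    rw [PySem.Dict.items_counter, List.filter_map]
    simp only [Function.comp_def, hcnt]
  have hcharperm : good.Perm ((PySem.Set.ofList cs).filter (fun c => pyOrder.contains c)) := by
    rw [List.perm_ext_iff_of_nodup hgoodnodup ((PySem.Set.nodup_ofList cs).filter _)]
    intro c
    simp only [hgood, List.mem_filter, PySem.Set.mem_ofList, hpA, Bool.and_eq_true,
      Bool.not_eq_true', decide_eq_false_iff_not, decide_eq_true_eq]
    constructor
    · rintro ⟨hp, hne, hpos⟩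
      exact ⟨List.count_pos_iff.mp hpos, (pyOrder_contains c).mpr ⟨hp, hne⟩⟩
    · rintro ⟨hmem, hcont⟩
      obtain ⟨hp, hne⟩ := (pyOrder_contains c).mp hcont
      exact ⟨hp, hne, List.count_pos_iff.mpr hmem⟩
  have hpw : (good.map (fun c => (c, cnt c))).Pairwise
      (fun a b => pyOrder.getD a.1 0 < pyOrder.getD b.1 0) := by
    rw [List.pairwise_map]
    have h0 := pyOrder_rank_pairwise
    rw [List.pairwise_map] at h0
    have hsub : good.Sublist (pyPrintable.filter (fun c => !decide (c ∈ pyExcluded))) := by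
      have heq : good = (pyPrintable.filter (fun c => !decide (c ∈ pyExcluded))).filter
          (fun c => decide (0 < cs.count c)) := by
        rw [List.filter_filter, hgood]
        apply List.filter_congr
        intro c _
        simp [hpA, Bool.and_comm]
      rw [heq]
      exact List.filter_sublist
    exact List.Pairwise.sublist hsub h0
  have hperm : (good.map (fun c => (c, cnt c))).Perm
      ((PySem.Dict.counter cs).items.filter (fun kv => pyOrder.contains kv.1)) := by
    rw [hpresent]
    exact hcharperm.map _
  have hsorted : PySem.List.sorted
      ((PySem.Dict.counter cs).items.filter (fun kv => pyOrder.contains kv.1))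
      (fun kv => pyOrder.getD kv.1 0) false
      = good.map (fun c => (c, cnt c)) :=
    PySem.List.sorted_eq_of_perm_of_pairwise_lt _ _ _ hperm hpw
  -- ---- assemble
  rw [hAitems, hsorted]
  rw [PySem.Dict.items_foldl_insert_fresh (good.map (fun c => (c, cnt c)))
    (fun kv => String.ofList [kv.1]) (fun kv => kv.2) PySem.Dict.empty
    (fun a _ => by simp [pysem])
    (by rw [List.map_map]; exact hmapnodup)]
  rw [hempty, List.nil_append, List.map_map]
  simp only [Function.comp_def]
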